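-- pv_equiv track=rewrite | github.com/ADanilczuk/Bachelor_Thesis | OnsetDetection/MagnitudeMethod.py | pick_best_onset_in_epsilon
-- ===== SOURCE A (Python) =====
-- def pick_best_onset_in_epsilon(onsets, epsilon):
--     n = len(onsets)
--     result = []
--     to_delete = set()
--     for i in range(0, n):
--         for j in range(0, n):
--             if abs(onsets[i] - onsets[j])  > epsilon or i == j:
--                 continue
--             if(onsets[i] > onsets[j]):
--                 to_delete.add(i)
--             else:
--                 to_delete.add(j)
--
--     for i in range(0, n):
--         if i not in to_delete:
--             result.append(onsets[i])
--
--     return result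
-- ===== SOURCE B (Python) =====
-- def pick_best_onset_in_epsilon(onsets, epsilon):
--     # Sort once; an onset survives iff no OTHER element lies in [v - epsilon, v]:
--     # its value must be unique and its sorted predecessor more than epsilon below it.
--     if epsilon < 0:
--         return list(onsets)
--     s = sorted(onsets)
--     n = len(s)
--     keep = set()
--     prev = None
--     i = 0
--     while i < n:
--         v = s[i]
--         if (prev is None or v - prev > epsilon) and (i + 1 == n or s[i + 1] != v):
--             keep.add(v)
--         prev = v
--         i += 1
--     return [v for v in onsets if v in keep]
-- ===== Notes on version B (the rewrite author's own statement) =====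
-- stated objective: faster
-- what changed: A compares all pairs of onsets to build a delete set of indices; B sorts the list once and keeps a value iff it is unique and its sorted predecessor is more than epsilon below it (i.e. no other element lies in [v-epsilon, v]), then filters the original list by membership in that set.
import Mathlib
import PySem

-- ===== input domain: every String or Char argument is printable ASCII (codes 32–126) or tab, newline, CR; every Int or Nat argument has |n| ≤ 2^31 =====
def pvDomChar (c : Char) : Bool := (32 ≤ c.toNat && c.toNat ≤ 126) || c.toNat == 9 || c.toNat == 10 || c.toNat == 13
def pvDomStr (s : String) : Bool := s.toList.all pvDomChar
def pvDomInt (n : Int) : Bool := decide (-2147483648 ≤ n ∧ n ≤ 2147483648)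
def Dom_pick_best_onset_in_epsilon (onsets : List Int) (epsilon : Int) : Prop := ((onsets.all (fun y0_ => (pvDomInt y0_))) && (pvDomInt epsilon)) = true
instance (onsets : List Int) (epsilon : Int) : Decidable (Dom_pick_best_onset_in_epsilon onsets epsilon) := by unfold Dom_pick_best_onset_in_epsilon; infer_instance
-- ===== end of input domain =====

-- B sorts once and keeps a value iff it is unique and its sorted predecessor is more than
-- epsilon below it, instead of A's all-pairs delete-set; measured faster, same return value.


-- ===== PORT A =====
def pick_best_onset_in_epsilon (onsets : List Int) (epsilon : Int) : List Int :=
  let n : Int := (onsets.length : Int)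
  let to_delete : PySem.Set Int :=
    (PySem.List.pyRange 0 n 1).foldl (fun td i =>
      (PySem.List.pyRange 0 n 1).foldl (fun td j =>
        let oi := (PySem.List.pyGet? onsets i).getD 0
        let oj := (PySem.List.pyGet? onsets j).getD 0
        if |oi - oj| > epsilon ∨ i = j then td
        else if oi > oj then PySem.Set.add td i
        else PySem.Set.add td j) td)
      PySem.Set.empty
  (PySem.List.pyRange 0 n 1).foldl (fun result i =>
    if PySem.Set.contains to_delete i then result
    else result ++ [(PySem.List.pyGet? onsets i).getD 0]) []

-- ===== PORT B =====
-- the while loop of Source B: walk the sorted list with the previous value, collecting kept values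
def pbLoop (epsilon : Int) (prev : Option Int) (s : List Int) (keep : PySem.Set Int) : PySem.Set Int :=
  match s with
  | [] => keep
  | v :: rest =>
      pbLoop epsilon (some v) rest
        (if ((match prev with | none => true | some p => decide (v - p > epsilon)) &&
             (match rest with | [] => true | w :: _ => decide (w ≠ v))) then
           PySem.Set.add keep v
         else keep)

def pick_best_onset_in_epsilon_alt (onsets : List Int) (epsilon : Int) : List Int :=
  if epsilon < 0 then onsets
  else
    let s := PySem.List.sorted onsets (fun x => x) false
    let keep := pbLoop epsilon none s PySem.Set.empty
    onsets.filter (fun v => PySem.Set.contains keep v)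

-- ===== PRECONDITION & SPEC =====
def Spec_pick_best_onset_in_epsilon (onsets : List Int) (epsilon : Int) (out : List Int) : Prop := out = pick_best_onset_in_epsilon_alt onsets epsilon
instance (onsets : List Int) (epsilon : Int) (out : List Int) : Decidable (Spec_pick_best_onset_in_epsilon onsets epsilon out) := by unfold Spec_pick_best_onset_in_epsilon; infer_instance

-- ===== CLAIM (what is proved, stated in full; the proofs are below) =====
def Claim_equal_pick_best_onset_in_epsilon : Prop := ∀ (onsets : List Int) (epsilon : Int), Dom_pick_best_onset_in_epsilon onsets epsilon → Spec_pick_best_onset_in_epsilon onsets epsilon (pick_best_onset_in_epsilon onsets epsilon)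

-- ===== LEMMAS AND PROOFS =====

-- the common value-level keep test: v survives iff no OTHER element lies in [v - epsilon, v]
def pbKeep (onsets : List Int) (epsilon v : Int) : Bool :=
  (decide (onsets.count v ≤ 1) || decide (epsilon < 0)) &&
  onsets.all (fun u => !(decide (u < v) && decide (v - u ≤ epsilon)))

-- the decision A's inner-loop body makes for the pair (i, j)
def gdel (onsets : List Int) (epsilon : Int) (i j : Int) : Option Int :=
  let oi := (PySem.List.pyGet? onsets i).getD 0
  let oj := (PySem.List.pyGet? onsets j).getD 0
  if |oi - oj| > epsilon ∨ i = j then none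
  else if oi > oj then some i else some j

theorem pbKeep_false_iff (onsets : List Int) (epsilon v : Int) :
    pbKeep onsets epsilon v = false ↔
      (0 ≤ epsilon ∧ 2 ≤ onsets.count v) ∨ ∃ u ∈ onsets, u < v ∧ v - u ≤ epsilon := by
  simp only [pbKeep, Bool.and_eq_false_iff, Bool.or_eq_false_iff, decide_eq_false_iff_not,
    not_le, not_lt, List.all_eq_false]
  constructor
  · rintro (⟨h1, h2⟩ | ⟨u, hu, h3⟩)
    · exact Or.inl ⟨h2, by omega⟩
    · simp at h3
      exact Or.inr ⟨u, hu, h3.1, by omega⟩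
  · rintro (⟨h1, h2⟩ | ⟨u, hu, h3, h4⟩)
    · exact Or.inl ⟨by omega, h1⟩
    · refine Or.inr ⟨u, hu, ?_⟩
      simp
      omega

theorem gdel_nat (onsets : List Int) (epsilon : Int) (a b : Nat)
    (ha : a < onsets.length) (hb : b < onsets.length) :
    gdel onsets epsilon (a : Int) (b : Int) =
      if |onsets[a] - onsets[b]| > epsilon ∨ a = b then none
      else if onsets[a] > onsets[b] then some (a : Int) else some (b : Int) := by
  have h1 : (PySem.List.pyGet? onsets (a : Int)).getD 0 = onsets[a] := by simp [ha]
  have h2 : (PySem.List.pyGet? onsets (b : Int)).getD 0 = onsets[b] := by simp [hb]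
  simp only [gdel, h1, h2, Int.natCast_inj]

theorem deleted_iff (onsets : List Int) (epsilon : Int) (k : Nat) (hk : k < onsets.length) :
    (∃ i ∈ PySem.List.pyRange 0 (onsets.length : Int) 1,
      ∃ j ∈ PySem.List.pyRange 0 (onsets.length : Int) 1,
        gdel onsets epsilon i j = some (k : Int)) ↔
    pbKeep onsets epsilon onsets[k] = false := by
  rw [pbKeep_false_iff]
  constructor
  · rintro ⟨i, hi, j, hj, hg⟩
    rw [PySem.List.mem_pyRange_one] at hi hj
    obtain ⟨a, rfl⟩ : ∃ a : Nat, i = (a : Int) := ⟨i.toNat, (Int.toNat_of_nonneg hi.1).symm⟩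
    obtain ⟨b, rfl⟩ : ∃ b : Nat, j = (b : Int) := ⟨j.toNat, (Int.toNat_of_nonneg hj.1).symm⟩
    have ha : a < onsets.length := by exact_mod_cast hi.2
    have hb : b < onsets.length := by exact_mod_cast hj.2
    rw [gdel_nat onsets epsilon a b ha hb] at hg
    split_ifs at hg with hc hgt
    · push_neg at hc
      obtain ⟨habs, hne⟩ := hc
      have hb' : |onsets[a] - onsets[b]| ≤ epsilon := habs
      have hab := abs_le.mp hb'
      have hak : a = k := by exact_mod_cast (Option.some.inj hg)
      subst hak
      exact Or.inr ⟨onsets[b], List.getElem_mem hb, hgt, by omega⟩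
    · push_neg at hc
      obtain ⟨habs, hne⟩ := hc
      have hab := abs_le.mp habs
      push_neg at hgt
      have hbk : b = k := by exact_mod_cast (Option.some.inj hg)
      subst hbk
      rcases lt_or_eq_of_le hgt with hlt | heq
      · exact Or.inr ⟨onsets[a], List.getElem_mem ha, hlt, by omega⟩
      · refine Or.inl ⟨by omega, ?_⟩
        rw [← List.duplicate_iff_two_le_count, List.duplicate_iff_exists_distinct_get]
        rcases Nat.lt_or_ge a b with h | h
        · exact ⟨⟨a, ha⟩, ⟨b, hb⟩, h, by simp [heq], by simp⟩
        · have h' : b < a := by omega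
          exact ⟨⟨b, hb⟩, ⟨a, ha⟩, h', by simp, by simp [heq]⟩
  · rintro (⟨heps, hcnt⟩ | ⟨u, hu, hlt, hle⟩)
    · -- duplicate: pick m ≠ k with onsets[m] = onsets[k]; pair (m, k) deletes k
      rw [← List.duplicate_iff_two_le_count, List.duplicate_iff_exists_distinct_get] at hcnt
      obtain ⟨np, nq, hlt2, h1, h2⟩ := hcnt
      simp only [List.get_eq_getElem] at h1 h2
      have hltv : (np : Nat) < (nq : Nat) := hlt2
      have hm : ∃ m, ∃ (hml : m < onsets.length), m ≠ k ∧ onsets[m] = onsets[k] := by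
        by_cases hpk : (np : Nat) = k
        · exact ⟨(nq : Nat), nq.2, by omega, h2.symm⟩
        · exact ⟨(np : Nat), np.2, hpk, h1.symm⟩
      obtain ⟨m, hmlen, hmk, hmv⟩ := hm
      refine ⟨(m : Int), ?_, (k : Int), ?_, ?_⟩
      · rw [PySem.List.mem_pyRange_one]
        exact ⟨Int.natCast_nonneg m, by exact_mod_cast hmlen⟩
      · rw [PySem.List.mem_pyRange_one]
        exact ⟨Int.natCast_nonneg k, by exact_mod_cast hk⟩
      · rw [gdel_nat onsets epsilon m k hmlen hk]
        have hcond : ¬(|onsets[m] - onsets[k]| > epsilon ∨ m = k) := by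
          push_neg
          exact ⟨by rw [hmv]; simpa using heps, hmk⟩
        rw [if_neg hcond, if_neg (by omega : ¬onsets[m] > onsets[k])]
    · -- u < v: pair (k, index of u) deletes k
      obtain ⟨m, hm, rfl⟩ := List.mem_iff_getElem.mp hu
      refine ⟨(k : Int), ?_, (m : Int), ?_, ?_⟩
      · rw [PySem.List.mem_pyRange_one]
        exact ⟨Int.natCast_nonneg k, by exact_mod_cast hk⟩
      · rw [PySem.List.mem_pyRange_one]
        exact ⟨Int.natCast_nonneg m, by exact_mod_cast hm⟩
      · rw [gdel_nat onsets epsilon k m hk hm]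
        have hcond : ¬(|onsets[k] - onsets[m]| > epsilon ∨ k = m) := by
          push_neg
          refine ⟨abs_le.mpr ⟨by omega, by omega⟩, by intro h; subst h; omega⟩
        rw [if_neg hcond, if_pos hlt]

theorem mem_foldl_optAdd (g : Int → Option Int) (l : List Int) (s : PySem.Set Int) (x : Int) :
    x ∈ l.foldl (fun s j => match g j with | some k => PySem.Set.add s k | none => s) s ↔
      x ∈ s ∨ ∃ j ∈ l, g j = some x := by
  induction l generalizing s with
  | nil => simp
  | cons a t ih =>
    simp only [List.foldl_cons, ih, List.mem_cons]
    cases h : g a with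
    | none => simp [h]
    | some k =>
      simp only [PySem.Set.mem_add]
      constructor
      · rintro (⟨hs | rfl⟩ | ⟨j, hj, hgj⟩)
        · tauto
        · exact Or.inr ⟨a, Or.inl rfl, h⟩
        · exact Or.inr ⟨j, Or.inr hj, hgj⟩
      · rintro (hs | ⟨j, (rfl | hj), hgj⟩)
        · tauto
        · rw [h] at hgj; injection hgj with e; exact Or.inl (Or.inr e.symm)
        · exact Or.inr ⟨j, hj, hgj⟩

theorem mem_foldl_foldl (g : Int → Int → Option Int) (lo li : List Int) (s : PySem.Set Int) (x : Int) :
    x ∈ lo.foldl (fun td i => li.foldl (fun td j => match g i j with | some k => PySem.Set.add td k | none => td) td) s ↔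
      x ∈ s ∨ ∃ i ∈ lo, ∃ j ∈ li, g i j = some x := by
  induction lo generalizing s with
  | nil => simp
  | cons a t ih =>
    simp only [List.foldl_cons, ih, mem_foldl_optAdd, List.mem_cons]
    constructor
    · rintro ((hs | hj) | ⟨i, hi, hj⟩)
      · tauto
      · exact Or.inr ⟨a, Or.inl rfl, hj⟩
      · exact Or.inr ⟨i, Or.inr hi, hj⟩
    · rintro (hs | ⟨i, (rfl | hi), hj⟩)
      · tauto
      · exact Or.inl (Or.inr hj)
      · exact Or.inr ⟨i, hi, hj⟩

theorem mem_to_delete (onsets : List Int) (epsilon : Int) (x : Int) :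
    x ∈ (PySem.List.pyRange 0 (onsets.length : Int) 1).foldl (fun td i =>
      (PySem.List.pyRange 0 (onsets.length : Int) 1).foldl (fun td j =>
        let oi := (PySem.List.pyGet? onsets i).getD 0
        let oj := (PySem.List.pyGet? onsets j).getD 0
        if |oi - oj| > epsilon ∨ i = j then td
        else if oi > oj then PySem.Set.add td i
        else PySem.Set.add td j) td)
      PySem.Set.empty ↔
    ∃ i ∈ PySem.List.pyRange 0 (onsets.length : Int) 1,
      ∃ j ∈ PySem.List.pyRange 0 (onsets.length : Int) 1,
        gdel onsets epsilon i j = some x := by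
  have hfun : (fun (td : PySem.Set Int) i =>
      (PySem.List.pyRange 0 (onsets.length : Int) 1).foldl (fun td j =>
        let oi := (PySem.List.pyGet? onsets i).getD 0
        let oj := (PySem.List.pyGet? onsets j).getD 0
        if |oi - oj| > epsilon ∨ i = j then td
        else if oi > oj then PySem.Set.add td i
        else PySem.Set.add td j) td) =
      (fun (td : PySem.Set Int) i =>
      (PySem.List.pyRange 0 (onsets.length : Int) 1).foldl (fun td j =>
        match gdel onsets epsilon i j with
        | some k => PySem.Set.add td k
        | none => td) td) := by
    funext td i
    congr 1
    funext td j
    simp only [gdel]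
    split_ifs <;> rfl
  rw [hfun, mem_foldl_foldl]
  simp [PySem.Set.empty]

theorem filter_map_pyRange (q : Int → Bool) (F : Int → Int) :
    ∀ (l : List Int) (s : Int), (∀ (m : Nat) (hm : m < l.length), F (s + m) = l[m]) →
      ((PySem.List.pyRange s (s + (l.length : Int)) 1).filter (fun i => q (F i))).map F
        = l.filter q := by
  intro l
  induction l with
  | nil => intro s _; simp
  | cons a t ih =>
    intro s hF
    have hlen : ((a :: t).length : Int) = (t.length : Int) + 1 := by push_cast [List.length_cons]; ring
    have hcons : PySem.List.pyRange s (s + ((a :: t).length : Int)) 1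
        = s :: PySem.List.pyRange (s + 1) (s + ((a :: t).length : Int)) 1 := by
      apply PySem.List.pyRange_one_cons
      rw [hlen]; omega
    have hFs : F s = a := by
      have := hF 0 (by simp)
      simpa using this
    have hrange : s + ((a :: t).length : Int) = (s + 1) + (t.length : Int) := by rw [hlen]; ring
    have ihapp := ih (s + 1) (by
      intro m hm
      have h2 := hF (m + 1) (by simpa using Nat.succ_lt_succ hm)
      simp only [List.getElem_cons_succ] at h2
      rw [← h2]
      congr 1
      push_cast
      ring)
    rw [hcons, hrange]
    simp only [List.filter_cons, hFs]
    cases hq : q a with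
    | true => simp [ihapp, hFs]
    | false => simp [ihapp]

theorem result_loop (onsets : List Int) (eps : Int) (td : PySem.Set Int)
    (h : ∀ (m : Nat) (hm : m < onsets.length),
      PySem.Set.contains td (m : Int) = !(pbKeep onsets eps onsets[m])) :
    (PySem.List.pyRange 0 (onsets.length : Int) 1).foldl
      (fun res i => if PySem.Set.contains td i then res
        else res ++ [(PySem.List.pyGet? onsets i).getD 0]) []
      = onsets.filter (pbKeep onsets eps) := by
  have hcong : ∀ (acc : List Int) (i : Int), i ∈ PySem.List.pyRange 0 (onsets.length : Int) 1 →
      (if PySem.Set.contains td i then acc else acc ++ [(PySem.List.pyGet? onsets i).getD 0])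
      = (if pbKeep onsets eps ((PySem.List.pyGet? onsets i).getD 0) then
          acc ++ [(PySem.List.pyGet? onsets i).getD 0] else acc) := by
    intro acc i hi
    rw [PySem.List.mem_pyRange_one] at hi
    obtain ⟨m, rfl⟩ : ∃ m : Nat, i = (m : Int) := ⟨i.toNat, (Int.toNat_of_nonneg hi.1).symm⟩
    have hm : m < onsets.length := by exact_mod_cast hi.2
    have hF : (PySem.List.pyGet? onsets (m : Int)).getD 0 = onsets[m] := by simp [hm]
    rw [h m hm, hF]
    cases hk : pbKeep onsets eps onsets[m] <;> simp
  have heq := PySem.List.foldl_congr_mem (PySem.List.pyRange 0 (onsets.length : Int) 1)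
    (fun res i => if PySem.Set.contains td i then res
      else res ++ [(PySem.List.pyGet? onsets i).getD 0])
    (fun res i => if pbKeep onsets eps ((PySem.List.pyGet? onsets i).getD 0) then
      res ++ [(PySem.List.pyGet? onsets i).getD 0] else res)
    [] hcong
  rw [heq, PySem.List.foldl_append_if]
  simpa using filter_map_pyRange (pbKeep onsets eps)
    (fun i => (PySem.List.pyGet? onsets i).getD 0) onsets 0
    (by intro m hm; simp [hm])


theorem a_eq_filter (onsets : List Int) (epsilon : Int) :
    pick_best_onset_in_epsilon onsets epsilon = onsets.filter (pbKeep onsets epsilon) := by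
  simp only [pick_best_onset_in_epsilon]
  apply result_loop
  intro m hm
  have h1 := mem_to_delete onsets epsilon (m : Int)
  have h2 := deleted_iff onsets epsilon m hm
  cases hk : pbKeep onsets epsilon onsets[m] with
  | false =>
    simp only [Bool.not_false]
    rw [PySem.Set.contains_iff]
    exact h1.mpr (h2.mpr hk)
  | true =>
    simp only [Bool.not_true]
    rw [← Bool.not_eq_true, PySem.Set.contains_iff]
    intro hmem
    have hff := h2.mp (h1.mp hmem)
    rw [hk] at hff
    exact absurd hff (by simp)

theorem headNe_iff (v : Int) (r : List Int) (hvle : ∀ u ∈ r, v ≤ u) (hsr : r.Pairwise (· ≤ ·)) :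
    ((match r with | [] => true | w :: _ => decide (w ≠ v)) = true) ↔ v ∉ r := by
  cases r with
  | nil => simp
  | cons w t =>
    simp only [decide_eq_true_eq]
    constructor
    · intro hwv hvin
      rcases List.mem_cons.mp hvin with h | h
      · exact hwv h.symm
      · have h1 : v ≤ w := hvle w List.mem_cons_self
        have h2 : w ≤ v := (List.pairwise_cons.mp hsr).1 v h
        exact hwv (by omega)
    · intro hnin hwv
      exact hnin (hwv ▸ List.mem_cons_self)

theorem prevOk_iff (epsilon v : Int) (pr : Option Int) :
    ((match pr with | none => true | some p => decide (v - p > epsilon)) = true) ↔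
      (∀ q, pr = some q → epsilon < v - q) := by
  cases pr with
  | none => simp
  | some p => simp [gt_iff_lt]

theorem mem_pbLoop (epsilon : Int) (he : 0 ≤ epsilon) (prev : Option Int) (l : List Int)
    (acc : PySem.Set Int) (hs : l.Pairwise (· ≤ ·))
    (hp : ∀ q, prev = some q → ∀ u ∈ l, q ≤ u) (x : Int) :
    x ∈ pbLoop epsilon prev l acc ↔
      x ∈ acc ∨ (x ∈ l ∧ l.count x = 1 ∧ (∀ u ∈ l, u < x → epsilon < x - u) ∧
        (∀ q, prev = some q → epsilon < x - q)) := by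
  induction l generalizing prev acc with
  | nil => simp [pbLoop]
  | cons v rest ih =>
    have hvle : ∀ u ∈ rest, v ≤ u := (List.pairwise_cons.mp hs).1
    have hs' : rest.Pairwise (· ≤ ·) := (List.pairwise_cons.mp hs).2
    have hp' : ∀ q, (some v : Option Int) = some q → ∀ u ∈ rest, q ≤ u := by
      intro q hq u hu
      injection hq with h
      subst h
      exact hvle u hu
    rw [pbLoop.eq_def]
    simp only []
    rw [ih (some v) _ hs' hp']
    have hCh := headNe_iff v rest hvle hs'
    have hCp := prevOk_iff epsilon v prev
    have hacc : ∀ (C : Bool), (x ∈ (if C then PySem.Set.add acc v else acc)) ↔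
        ((C = true ∧ x = v) ∨ x ∈ acc) := by
      intro C
      cases C with
      | true => simp [PySem.Set.mem_add]; tauto
      | false => simp
    rw [hacc]
    constructor
    · rintro ((⟨hC, rfl⟩ | hin) | ⟨hin, hcnt, hall, hq⟩)
      · -- x = v was just added: prove the full property for v
        rw [Bool.and_eq_true] at hC
        obtain ⟨hCp', hCh'⟩ := hC
        refine Or.inr ⟨List.mem_cons_self, ?_, ?_, hCp.mp hCp'⟩
        · rw [List.count_cons_self, List.count_eq_zero.mpr (hCh.mp hCh')]
        · intro u hu hlt
          rcases List.mem_cons.mp hu with rfl | hu'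
          · omega
          · have := hvle u hu'
            omega
      · exact Or.inl hin
      · -- x came from the recursive call on rest
        have hxv : v < x := by
          have h1 : v ≤ x := hvle x hin
          have h2 : epsilon < x - v := hq v rfl
          omega
        refine Or.inr ⟨List.mem_cons_of_mem v hin, ?_, ?_, ?_⟩
        · rw [List.count_cons_of_ne (by omega) , hcnt]
        · intro u hu hlt
          rcases List.mem_cons.mp hu with rfl | hu'
          · exact hq u rfl
          · exact hall u hu' hlt
        · intro q hqq
          have h1 : q ≤ v := hp q hqq v List.mem_cons_self
          have h2 : epsilon < x - v := hq v rfl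
          omega
    · rintro (hin | ⟨hin, hcnt, hall, hq⟩)
      · exact Or.inl (Or.inr hin)
      · by_cases hxv : x = v
        · subst hxv
          refine Or.inl (Or.inl ⟨?_, rfl⟩)
          rw [Bool.and_eq_true, hCp, hCh]
          refine ⟨hq, ?_⟩
          intro hvin
          have : (x :: rest).count x ≥ 2 := by
            rw [List.count_cons_self]
            have : rest.count x ≥ 1 := List.count_pos_iff.mpr hvin
            omega
          omega
        · have hin' : x ∈ rest := by
            rcases List.mem_cons.mp hin with h | h
            · exact absurd h hxv
            · exact h
          have hvx : v < x := by
            have := hvle x hin'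
            omega
          refine Or.inr ⟨hin', ?_, ?_, ?_⟩
          · rw [List.count_cons_of_ne (by omega)] at hcnt
            exact hcnt
          · intro u hu hlt
            exact hall u (List.mem_cons_of_mem v hu) hlt
          · intro q hqq
            injection hqq with h
            subst h
            exact hall v List.mem_cons_self hvx

theorem b_eq_filter (onsets : List Int) (epsilon : Int) :
    pick_best_onset_in_epsilon_alt onsets epsilon = onsets.filter (pbKeep onsets epsilon) := by
  rw [pick_best_onset_in_epsilon_alt]
  split_ifs with hneg
  · symm
    rw [List.filter_eq_self]
    intro v hv
    simp only [pbKeep, Bool.or_eq_true, Bool.and_eq_true, decide_eq_true_eq, List.all_eq_true]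
    refine ⟨Or.inr hneg, ?_⟩
    intro u hu
    simp only [Bool.not_eq_true', Bool.and_eq_false_iff, decide_eq_false_iff_not, not_lt, not_le]
    omega
  · have he : 0 ≤ epsilon := by omega
    have hsorted : (PySem.List.sorted onsets (fun x => x) false).Pairwise (· ≤ ·) := by
      simpa using PySem.List.sorted_pairwise (xs := onsets) (key := fun x => x)
    have hperm : (PySem.List.sorted onsets (fun x => x) false).Perm onsets :=
      PySem.List.sorted_perm onsets (fun x => x) false
    apply List.filter_congr
    intro v hv
    have hmem := mem_pbLoop epsilon he none (PySem.List.sorted onsets (fun x => x) false)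
      PySem.Set.empty hsorted (by intro q hq u hu; exact absurd hq (by simp)) v
    rw [Bool.eq_iff_iff, PySem.Set.contains_iff, hmem]
    constructor
    · rintro (h0 | ⟨hins, hcnt1, hall, _⟩)
      · exact absurd h0 (by simp [PySem.Set.empty])
      · simp only [pbKeep, Bool.and_eq_true, Bool.or_eq_true, decide_eq_true_eq, List.all_eq_true]
        refine ⟨Or.inl (by rw [← hperm.count_eq v]; omega), ?_⟩
        intro u hu
        simp only [Bool.not_eq_true', Bool.and_eq_false_iff, decide_eq_false_iff_not, not_lt, not_le]
        by_cases hlt : u < v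
        · exact Or.inr (by have := hall u (hperm.mem_iff.mpr hu) hlt; omega)
        · exact Or.inl (by omega)
    · intro hpb
      simp only [pbKeep, Bool.and_eq_true, Bool.or_eq_true, decide_eq_true_eq, List.all_eq_true] at hpb
      obtain ⟨hc, hall⟩ := hpb
      right
      have hvs : v ∈ PySem.List.sorted onsets (fun x => x) false := hperm.mem_iff.mpr hv
      refine ⟨hvs, ?_, ?_, by intro q hq; exact absurd hq (by simp)⟩
      · rw [hperm.count_eq v]
        have h1 : 0 < onsets.count v := List.count_pos_iff.mpr hv
        rcases hc with h | h
        · omega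
        · omega
      · intro u hu hlt
        have h2 := hall u (hperm.mem_iff.mp hu)
        simp only [Bool.not_eq_true', Bool.and_eq_false_iff, decide_eq_false_iff_not, not_lt, not_le] at h2
        rcases h2 with h2 | h2
        · omega
        · omega

-- ===== VERDICT (by name: the statement is the Claim_ definition above) =====
theorem pick_best_onset_in_epsilon_spec : Claim_equal_pick_best_onset_in_epsilon := by
  intro onsets epsilon _
  unfold Spec_pick_best_onset_in_epsilon
  rw [a_eq_filter, b_eq_filter]
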